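-- pv_equiv track=rewrite | github.com/speedygonzalez777/resume-agent | app/services/resume_generation_service.py | _source_signal_supports_term
-- ===== SOURCE A (Python) =====
-- def _normalize(value: str | None) -> str:
--     """Normalize a string for case-insensitive comparisons."""
--     if not value:
--         return ""
--     return value.strip().lower()
--
-- def _source_signal_supports_term(term: str, source_signal_terms: list[str]) -> bool:
--     """Return whether a reportable term is corroborated by source-level semantic signals."""
--     normalized_term = _normalize(term)
--     if not normalized_term:
--         return False
--
--     for source_term in source_signal_terms:
--         normalized_source_term = _normalize(source_term)
--         if not normalized_source_term:
--             continue
--         if normalized_term == normalized_source_term: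
--             return True
--         if len(normalized_term) >= 4 and len(normalized_source_term) >= 4:
--             if normalized_term in normalized_source_term or normalized_source_term in normalized_term:
--                 return True
--     return False
-- ===== SOURCE B (Python) =====
-- def _normalize(value):
--     """Normalize a string for case-insensitive comparisons."""
--     if not value:
--         return ""
--     return value.strip().lower()
--
-- def _source_signal_supports_term(term, source_signal_terms):
--     """Return whether a reportable term is corroborated by source-level semantic signals."""
--     target = _normalize(term)
--     if not target:
--         return False
--
--     # Pass 1: normalize once, keep the non-empty candidates, look for an exact hit.
--     candidates = [_normalize(s) for s in source_signal_terms]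
--     candidates = [c for c in candidates if c]
--     if target in set(candidates):
--         return True
--
--     # Pass 2: bidirectional substring containment, only for terms of length >= 4.
--     if len(target) < 4:
--         return False
--     return any(len(c) >= 4 and (target in c or c in target) for c in candidates)
-- ===== Notes on version B (the rewrite author's own statement) =====
-- stated objective: alternative
-- what changed: B normalizes all source terms once into a filtered candidate list, checks the target against a set of exact matches, and only then runs a separate substring-containment pass, instead of A's single loop interleaving both tests per element.
import Mathlib
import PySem

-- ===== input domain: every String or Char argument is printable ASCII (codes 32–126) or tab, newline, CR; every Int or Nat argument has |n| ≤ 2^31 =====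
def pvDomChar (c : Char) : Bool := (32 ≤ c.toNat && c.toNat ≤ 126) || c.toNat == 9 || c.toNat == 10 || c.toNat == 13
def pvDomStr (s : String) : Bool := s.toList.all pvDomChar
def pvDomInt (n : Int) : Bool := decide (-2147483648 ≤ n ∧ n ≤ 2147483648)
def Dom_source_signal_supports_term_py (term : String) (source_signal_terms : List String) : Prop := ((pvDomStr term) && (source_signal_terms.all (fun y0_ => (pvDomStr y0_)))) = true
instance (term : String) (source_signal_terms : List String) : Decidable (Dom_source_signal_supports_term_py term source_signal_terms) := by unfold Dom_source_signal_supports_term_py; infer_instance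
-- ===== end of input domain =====

-- B builds the normalized candidate list once, checks an exact-match set first, then runs a
-- separate substring pass, instead of A's single loop interleaving both tests per element
-- (alternative decomposition; same asymptotic cost).

-- ===== PORT A =====
-- shared helper: Python _normalize (both programs define it identically)
def pyNorm (s : String) : String :=
  if s = "" then "" else PySem.Str.lower (PySem.Str.strip s)

-- the 'for source_term in source_signal_terms' loop of A, with the early returns
def aLoop (nt : String) : List String → Bool
  | [] => false
  | s :: rest =>
    let ns := pyNorm s
    if ns = "" then aLoop nt rest
    else if nt = ns then true
    else if 4 ≤ PySem.Str.len nt ∧ 4 ≤ PySem.Str.len ns then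
      if PySem.Str.isIn nt ns || PySem.Str.isIn ns nt then true
      else aLoop nt rest
    else aLoop nt rest

def source_signal_supports_term_py (term : String) (source_signal_terms : List String) : Bool :=
  let normalized_term := pyNorm term
  if normalized_term = "" then false
  else aLoop normalized_term source_signal_terms

-- ===== PORT B =====
def source_signal_supports_term_py_alt (term : String) (source_signal_terms : List String) : Bool :=
  let target := pyNorm term
  if target = "" then false
  else
    let candidates := (source_signal_terms.map pyNorm).filter (fun c => c ≠ "")
    if PySem.Set.contains (PySem.Set.ofList candidates) target then true
    else if PySem.Str.len target < 4 then false
    else candidates.any (fun c =>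
      decide (4 ≤ PySem.Str.len c) && (PySem.Str.isIn target c || PySem.Str.isIn c target))

-- ===== PRECONDITION & SPEC =====
def Spec_source_signal_supports_term_py (term : String) (source_signal_terms : List String) (out : Bool) : Prop := out = source_signal_supports_term_py_alt term source_signal_terms
instance (term : String) (source_signal_terms : List String) (out : Bool) : Decidable (Spec_source_signal_supports_term_py term source_signal_terms out) := by unfold Spec_source_signal_supports_term_py; infer_instance

-- ===== CLAIM (what is proved, stated in full; the proofs are below) =====
def Claim_equal_source_signal_supports_term_py : Prop := ∀ (term : String) (source_signal_terms : List String), Dom_source_signal_supports_term_py term source_signal_terms → Spec_source_signal_supports_term_py term source_signal_terms (source_signal_supports_term_py term source_signal_terms)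

-- ===== LEMMAS AND PROOFS =====

-- the common propositional characterisation of both programs' result
def ssMatch (nt : String) (l : List String) : Prop :=
  (∃ s ∈ l, pyNorm s = nt) ∨
    (4 ≤ PySem.Str.len nt ∧
     ∃ s ∈ l, 4 ≤ PySem.Str.len (pyNorm s) ∧
       (PySem.Str.isIn nt (pyNorm s) = true ∨ PySem.Str.isIn (pyNorm s) nt = true))

theorem len_ge_ne_empty (c : String) (h : 4 ≤ PySem.Str.len c) : c ≠ "" := by
  intro e; subst e; simp [PySem.Str.len] at h

theorem aLoop_true_iff (nt : String) (l : List String) (h : nt ≠ "") :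
    aLoop nt l = true ↔ ssMatch nt l := by
  induction l with
  | nil => simp [aLoop, ssMatch]
  | cons s rest ih =>
    simp only [ssMatch] at ih ⊢
    rw [show aLoop nt (s :: rest) =
      (if pyNorm s = "" then aLoop nt rest
       else if nt = pyNorm s then true
       else if 4 ≤ PySem.Str.len nt ∧ 4 ≤ PySem.Str.len (pyNorm s) then
         (if (PySem.Str.isIn nt (pyNorm s) || PySem.Str.isIn (pyNorm s) nt) = true then true
          else aLoop nt rest)
       else aLoop nt rest) from rfl]
    split_ifs with h0 h1 h2 h3
    · rw [ih]
      have hne : ¬ (4 ≤ PySem.Str.len (pyNorm s)) := by rw [h0]; simp [PySem.Str.len]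
      constructor
      · rintro (⟨a, ha, rfl⟩ | ⟨h4, a, ha, rest'⟩)
        · exact Or.inl ⟨a, List.mem_cons_of_mem _ ha, rfl⟩
        · exact Or.inr ⟨h4, a, List.mem_cons_of_mem _ ha, rest'⟩
      · rintro (⟨a, ha, rfl⟩ | ⟨h4, a, ha, h4a, hin⟩) <;>
          rcases List.mem_cons.mp ha with rfl | ha'
        · exact absurd h0 h
        · exact Or.inl ⟨a, ha', rfl⟩
        · exact absurd h4a hne
        · exact Or.inr ⟨h4, a, ha', h4a, hin⟩
    · constructor
      · intro _; exact Or.inl ⟨s, List.mem_cons_self, h1.symm⟩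
      · intro _; rfl
    · constructor
      · intro _
        exact Or.inr ⟨h2.1, s, List.mem_cons_self, h2.2, (by simpa using h3)⟩
      · intro _; rfl
    · rw [ih]
      rw [Bool.or_eq_true] at h3
      constructor
      · rintro (⟨a, ha, rfl⟩ | ⟨h4, a, ha, rest'⟩)
        · exact Or.inl ⟨a, List.mem_cons_of_mem _ ha, rfl⟩
        · exact Or.inr ⟨h4, a, List.mem_cons_of_mem _ ha, rest'⟩
      · rintro (⟨a, ha, rfl⟩ | ⟨h4, a, ha, h4a, hin⟩) <;>
          rcases List.mem_cons.mp ha with rfl | ha'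
        · exact absurd rfl h1
        · exact Or.inl ⟨a, ha', rfl⟩
        · exact absurd (Or.imp (fun x => x) (fun x => x) hin) h3
        · exact Or.inr ⟨h4, a, ha', h4a, hin⟩
    · rw [ih]
      constructor
      · rintro (⟨a, ha, rfl⟩ | ⟨h4, a, ha, rest'⟩)
        · exact Or.inl ⟨a, List.mem_cons_of_mem _ ha, rfl⟩
        · exact Or.inr ⟨h4, a, List.mem_cons_of_mem _ ha, rest'⟩
      · rintro (⟨a, ha, rfl⟩ | ⟨h4, a, ha, h4a, hin⟩) <;>
          rcases List.mem_cons.mp ha with rfl | ha'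
        · exact absurd rfl h1
        · exact Or.inl ⟨a, ha', rfl⟩
        · exact absurd ⟨h4, h4a⟩ h2
        · exact Or.inr ⟨h4, a, ha', h4a, hin⟩

theorem alt_true_iff (term : String) (l : List String) (h : pyNorm term ≠ "") :
    source_signal_supports_term_py_alt term l = true ↔ ssMatch (pyNorm term) l := by
  unfold source_signal_supports_term_py_alt ssMatch
  simp only [if_neg h]
  by_cases hm : PySem.Set.contains
      (PySem.Set.ofList ((l.map pyNorm).filter (fun c => c ≠ ""))) (pyNorm term) = true
  · simp only [if_pos hm, true_iff]
    rw [PySem.Set.contains_iff, PySem.Set.mem_ofList] at hm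
    rcases List.mem_filter.mp hm with ⟨hmem, _⟩
    rcases List.mem_map.mp hmem with ⟨a, ha, hae⟩
    exact Or.inl ⟨a, ha, hae⟩
  · simp only [if_neg hm]
    rw [PySem.Set.contains_iff, PySem.Set.mem_ofList] at hm
    by_cases hl : PySem.Str.len (pyNorm term) < 4
    · simp only [if_pos hl, Bool.false_eq_true, false_iff]
      rintro (⟨a, ha, hae⟩ | ⟨h4, _⟩)
      · exact hm (List.mem_filter.mpr ⟨List.mem_map.mpr ⟨a, ha, hae⟩, by simpa using h⟩)
      · exact absurd h4 (by omega)
    · simp only [if_neg hl, List.any_eq_true, Bool.and_eq_true, decide_eq_true_eq,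
        Bool.or_eq_true, List.mem_filter, List.mem_map]
      constructor
      · rintro ⟨c, ⟨⟨a, ha, rfl⟩, _⟩, h4c, hin⟩
        exact Or.inr ⟨by omega, a, ha, h4c, hin⟩
      · rintro (⟨a, ha, hae⟩ | ⟨_, a, ha, h4a, hin⟩)
        · exact absurd (List.mem_filter.mpr ⟨List.mem_map.mpr ⟨a, ha, hae⟩, by simpa using h⟩) hm
        · exact ⟨pyNorm a, ⟨⟨a, ha, rfl⟩, by simpa using len_ge_ne_empty _ h4a⟩, h4a, hin⟩

-- ===== VERDICT (by name: the statement is the Claim_ definition above) =====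
theorem source_signal_supports_term_py_spec : Claim_equal_source_signal_supports_term_py := by
  intro term terms _
  unfold Spec_source_signal_supports_term_py
  by_cases h : pyNorm term = ""
  · simp [source_signal_supports_term_py, source_signal_supports_term_py_alt, h]
  · have ha := aLoop_true_iff (pyNorm term) terms h
    have hb := alt_true_iff term terms h
    have hA : source_signal_supports_term_py term terms = aLoop (pyNorm term) terms := by
      simp [source_signal_supports_term_py, h]
    rw [hA, Bool.eq_iff_iff, ha, hb]
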